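-- pv_equiv track=rewrite | github.com/KoenMW/project-mycelium-be | services/cluster_mycelium.py | group_images_by_time_window
-- ===== SOURCE A (Python) =====
-- from typing import Dict, List, Optional, Tuple
--
-- def group_images_by_time_window(images: List[Tuple[str, int]], time_window: int) -> Dict[int, List[str]]:
--     """
--     Groups images into bins based on the selected time window.
--
--     Args:
--         images (List[Tuple[str, int]]): List of (image_path, hours).
--         time_window (int): Number of hours per feature map.
--
--     Returns:
--         Dict[int, List[str]]: Grouped images, key = time window index.
--     """
--     grouped_images: Dict[int, List[str]] = {}
--
--     for image_path, hours in images: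
--         time_bin = hours // time_window  # Assign to a time window
--         if time_bin not in grouped_images:
--             grouped_images[time_bin] = []
--         grouped_images[time_bin].append(image_path)
--
--     return grouped_images
-- ===== SOURCE B (Python) =====
-- from typing import Dict, List, Tuple
--
-- def group_images_by_time_window(images: List[Tuple[str, int]], time_window: int) -> Dict[int, List[str]]:
--     order = list(dict.fromkeys(h // time_window for _, h in images))
--     return {b: [p for p, h in images if h // time_window == b] for b in order}
-- ===== Notes on version B (the rewrite author's own statement) =====
-- stated objective: alternative
-- what changed: Replaces the single-pass dict accumulation by a two-phase decomposition: first compute the distinct bin keys in first-occurrence order with dict.fromkeys, then build each bin's path list with a per-bin filtering pass over the input.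
import Mathlib
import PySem

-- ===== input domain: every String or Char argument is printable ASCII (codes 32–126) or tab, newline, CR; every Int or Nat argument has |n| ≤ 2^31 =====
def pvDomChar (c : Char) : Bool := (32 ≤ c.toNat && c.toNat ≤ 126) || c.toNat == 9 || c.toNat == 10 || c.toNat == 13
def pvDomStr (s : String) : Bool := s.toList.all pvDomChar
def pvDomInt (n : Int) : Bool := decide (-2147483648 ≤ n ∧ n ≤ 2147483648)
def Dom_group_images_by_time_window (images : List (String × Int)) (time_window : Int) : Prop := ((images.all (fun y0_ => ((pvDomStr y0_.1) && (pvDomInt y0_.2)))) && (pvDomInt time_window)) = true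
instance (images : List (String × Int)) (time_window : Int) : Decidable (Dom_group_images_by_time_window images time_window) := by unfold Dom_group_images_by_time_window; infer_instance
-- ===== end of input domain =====

-- B replaces A's single-pass dict accumulation by a two-phase decomposition (distinct bin
-- keys in first-occurrence order, then one gathering pass per bin); objective: alternative.

-- ===== PORT A =====
-- A: one pass; for each (path, hours), bin = hours // time_window; create empty entry if
-- the bin is new, then append the path to it.
def group_images_by_time_window (images : List (String × Int)) (time_window : Int) : List (Int × List String) :=
  (images.foldl
    (fun (grouped : PySem.Dict Int (List String)) x =>
      let time_bin := PySem.Int.floordiv x.2 time_window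
      let grouped := if grouped.contains time_bin then grouped else grouped.insert time_bin []
      grouped.modify time_bin [] (fun l => l ++ [x.1]))
    PySem.Dict.empty).items

-- ===== PORT B =====
-- B: the distinct bins in first-occurrence order (dict.fromkeys), then for each bin one
-- filtering pass over the input collecting its paths.
def group_images_by_time_window_alt (images : List (String × Int)) (time_window : Int) : List (Int × List String) :=
  let order := PySem.List.dedup (images.map (fun x => PySem.Int.floordiv x.2 time_window))
  order.map (fun b =>
    (b, (images.filter (fun x => PySem.Int.floordiv x.2 time_window == b)).map (fun x => x.1)))

-- ===== PRECONDITION & SPEC =====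
-- Pre_ excludes only time_window = 0 with a non-empty list, where the Python A raises ZeroDivisionError.
def Pre_group_images_by_time_window (images : List (String × Int)) (time_window : Int) : Prop :=
  images = [] ∨ time_window ≠ 0
instance (images : List (String × Int)) (time_window : Int) : Decidable (Pre_group_images_by_time_window images time_window) := by unfold Pre_group_images_by_time_window; infer_instance
def pvWitness_group_images_by_time_window : (List (String × Int)) × Int := ([("a", 5), ("b", -5), ("c", 4)], 3)

def Spec_group_images_by_time_window (images : List (String × Int)) (time_window : Int) (out : List (Int × List String)) : Prop := out = group_images_by_time_window_alt images time_window
instance (images : List (String × Int)) (time_window : Int) (out : List (Int × List String)) : Decidable (Spec_group_images_by_time_window images time_window out) := by unfold Spec_group_images_by_time_window; infer_instance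

-- ===== CLAIM (what is proved, stated in full; the proofs are below) =====
def Claim_equal_group_images_by_time_window : Prop := ∀ (images : List (String × Int)) (time_window : Int), Dom_group_images_by_time_window images time_window → Pre_group_images_by_time_window images time_window → Spec_group_images_by_time_window images time_window (group_images_by_time_window images time_window)

-- ===== LEMMAS AND PROOFS =====

-- A's step ("create empty entry if new, then append") is one Dict.modify.
theorem pv_step_eq_modify (d : PySem.Dict Int (List String)) (b : Int) (p : String) :
    (if d.contains b then d else d.insert b []).modify b [] (fun l => l ++ [p])
      = d.modify b [] (fun l => l ++ [p]) := by
  by_cases h : d.contains b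
  · simp [h]
  · simp only [h, Bool.false_eq_true, if_false, PySem.Dict.modify,
      PySem.Dict.getD_insert_self, PySem.Dict.insert_insert_self,
      PySem.Dict.getD_of_not_contains d [] (by simpa using h), List.nil_append]

-- keys of the pair-fold: first occurrences of the keys, in order (pair version of keys_foldl_modify).
theorem pv_keys_fold (l : List (Int × String)) (d : PySem.Dict Int (List String)) :
    (l.foldl (fun d p => d.modify p.1 [] (fun v => v ++ [p.2])) d).keys
      = PySem.Set.update d.keys (l.map (fun p => p.1)) := by
  induction l generalizing d with
  | nil => rfl
  | cons x t ih =>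
      simp only [List.foldl_cons, List.map_cons, PySem.Set.update, List.foldl_cons, ih]
      congr 1
      simp only [PySem.Dict.modify]
      by_cases h : d.contains x.1
      · simp [PySem.Dict.keys_insert_of_contains d _ h, PySem.Set.add,
          (PySem.Dict.contains_iff_mem_keys d x.1).mp h]
      · have h' : x.1 ∉ d.keys := fun hm => h ((PySem.Dict.contains_iff_mem_keys d x.1).mpr hm)
        simp [PySem.Dict.keys_insert_of_not_contains d _ (by simpa using h), PySem.Set.add, h']

-- ===== VERDICT (by name: the statement is the Claim_ definition above) =====
theorem group_images_by_time_window_spec : Claim_equal_group_images_by_time_window := by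
  intro images time_window _ _
  unfold Spec_group_images_by_time_window group_images_by_time_window group_images_by_time_window_alt
  set key : String × Int → Int := fun x => PySem.Int.floordiv x.2 time_window with hkey
  -- rewrite A's fold into the canonical pair fold
  have hfold :
      images.foldl
        (fun (grouped : PySem.Dict Int (List String)) x =>
          let time_bin := key x
          let grouped := if grouped.contains time_bin then grouped else grouped.insert time_bin []
          grouped.modify time_bin [] (fun l => l ++ [x.1]))
        PySem.Dict.empty
      = (images.map (fun x => (key x, x.1))).foldl
          (fun d p => d.modify p.1 [] (fun v => v ++ [p.2])) PySem.Dict.empty := by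
    rw [List.foldl_map]
    exact List.foldl_ext _ _ _ (fun d x _ => pv_step_eq_modify d (key x) x.1)
  rw [hfold]
  set l : List (Int × String) := images.map (fun x => (key x, x.1)) with hl
  set D := l.foldl (fun d p => d.modify p.1 [] (fun v => v ++ [p.2])) PySem.Dict.empty with hD
  have hkeys : D.keys = PySem.Set.ofList (images.map key) := by
    rw [hD, pv_keys_fold]
    simp [hl, PySem.Set.ofList, PySem.Set.update, PySem.Dict.keys_empty, List.map_map,
      Function.comp_def]
  have hnodup : D.keys.Nodup := hkeys ▸ PySem.Set.nodup_ofList _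
  rw [PySem.Dict.items_eq_map_keys D hnodup [], hkeys]
  simp only [PySem.List.dedup_eq_ofList]
  apply List.map_congr_left
  intro b _
  have hgetD : D.getD b [] =
      (images.filter (fun x => key x == b)).map (fun x => x.1) := by
    rw [hD, PySem.Dict.getD_foldl_modify_append l PySem.Dict.empty b]
    simp [hl, List.filter_map, List.map_map, Function.comp_def]
  rw [hgetD]
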